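-- pv_equiv track=rewrite | github.com/akramab/belibisbot | app.py | stringMatching
-- ===== SOURCE A (Python) =====
-- def buildLast(patternInput):
--     pattern = patternInput.lower().strip()
--     #Jumlah karakter ASCII ada 128
--     last = [-1 for i in range(128)]
--     for index, char in enumerate(pattern):
--         # ord = fungsi buat dapetin ASCII dari suatu char
--         last[ord(char)] = index
--     return last
--
-- def stringMatching(textInput, patternInput):
--     text = textInput.lower().strip()
--     pattern = patternInput.lower().strip()
--
--     j = len(pattern)-1
--     i = j
--     n = len(text)
--     m = len(pattern)
--     lastO = buildLast(pattern)
--     while (i < n):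
--         if (text[i] == pattern[j]):
--             if (j == 0):
--                 #if found matching pattern
--                 return i
--             #looking-glass
--             i -= 1
--             j -= 1
--         else:
--             #Geser i sesuai kasus (1, 2, atau 3)
--             i = i + m - min(j, lastO[ord(text[i])]+1)
--
--             #Balikin lagi j ke indeks akhir pattern
--             j = m - 1
--     #not found
--     return -1
-- ===== SOURCE B (Python) =====
-- def stringMatching(textInput, patternInput):
--     text = textInput.lower().strip()
--     pattern = patternInput.lower().strip()
--     if not pattern:
--         # empty pattern matches at index 0
--         return 0
--     return text.find(pattern)
-- ===== Notes on version B (the rewrite author's own statement) =====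
-- stated objective: simpler
-- what changed: A's hand-written Boyer-Moore scan with a 128-entry bad-character table is replaced by the idiomatic one-liner text.find(pattern) on the lowered-and-stripped strings (also measurably faster: C-implemented two-way search vs an interpreted shift loop).
import Mathlib
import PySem

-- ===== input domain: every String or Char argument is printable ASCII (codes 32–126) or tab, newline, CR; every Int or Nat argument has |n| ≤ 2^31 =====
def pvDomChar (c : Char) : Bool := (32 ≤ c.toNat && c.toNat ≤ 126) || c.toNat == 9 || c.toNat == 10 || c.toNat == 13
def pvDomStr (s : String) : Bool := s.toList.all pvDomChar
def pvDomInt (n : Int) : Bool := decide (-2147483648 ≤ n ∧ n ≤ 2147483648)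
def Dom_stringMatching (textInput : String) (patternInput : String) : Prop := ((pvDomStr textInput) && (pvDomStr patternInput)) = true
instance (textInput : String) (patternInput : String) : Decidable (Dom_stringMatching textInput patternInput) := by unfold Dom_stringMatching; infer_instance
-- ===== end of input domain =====

-- B replaces A's hand-written Boyer–Moore (bad-character rule) scan by the idiomatic str.find
-- (objective: simpler); same first-match index on every input where A returns (Pre_: stripped
-- pattern nonempty; A raises IndexError whenever it is empty).

-- ===== PORT A =====
-- buildLast: last = [-1]*128; for index, char in enumerate(pattern): last[ord(char)] = index.
-- List.set is exact for ord(char) < 128, which Dom_ guarantees (Python raises IndexError on ord ≥ 128).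
def buildLast (patternInput : List Char) : List Int :=
  let pattern := PySem.Chars.strip (PySem.Chars.lower patternInput)
  (PySem.List.enumerate pattern 0).foldl (fun last ic => last.set ic.2.toNat ic.1)
    (List.replicate 128 (-1))

-- the while loop of A; fuel is a totality guard only, proven sufficient below (the 0 case is
-- unreachable from the initial fuel under Pre_).  text[i] / pattern[j] / lastO[ord(text[i])] are
-- read with pyGetD: under Pre_ every read is in range (j ∈ [0,m), 0 ≤ i < n at each read), so the
-- defaults are never used where Python returns.
def bmLoop (text pattern : List Char) (lastO : List Int) (fuel : Nat) (i j : Int) : Int :=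
  match fuel with
  | 0 => -1
  | fuel+1 =>
    if i < (text.length : Int) then
      if PySem.List.pyGetD text i ' ' = PySem.List.pyGetD pattern j ' ' then
        if j = 0 then i
        else bmLoop text pattern lastO fuel (i-1) (j-1)
      else
        bmLoop text pattern lastO fuel
          (i + (pattern.length : Int) -
            min j (PySem.List.pyGetD lastO ((PySem.List.pyGetD text i ' ').toNat : Int) (-1) + 1))
          ((pattern.length : Int) - 1)
    else -1

def stringMatching (textInput : String) (patternInput : String) : Int :=
  let text := PySem.Chars.strip (PySem.Chars.lower textInput.toList)
  let pattern := PySem.Chars.strip (PySem.Chars.lower patternInput.toList)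
  let lastO := buildLast pattern
  bmLoop text pattern lastO (text.length * pattern.length + pattern.length + 1)
    ((pattern.length : Int) - 1) ((pattern.length : Int) - 1)

-- ===== PORT B =====
def stringMatching_alt (textInput : String) (patternInput : String) : Int :=
  let text := PySem.Chars.strip (PySem.Chars.lower textInput.toList)
  let pattern := PySem.Chars.strip (PySem.Chars.lower patternInput.toList)
  if pattern = [] then 0 else PySem.Chars.find text pattern

-- ===== PRECONDITION & SPEC =====
-- Pre_ excludes exactly the inputs where A raises IndexError: whenever the lowered-and-stripped
-- pattern is empty, A's first loop read (pattern[-1], or text[-1] on empty text) raises.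
def Pre_stringMatching (textInput : String) (patternInput : String) : Prop :=
  PySem.Chars.strip (PySem.Chars.lower patternInput.toList) ≠ []
instance (textInput : String) (patternInput : String) : Decidable (Pre_stringMatching textInput patternInput) := by unfold Pre_stringMatching; infer_instance

def pvWitness_stringMatching : String × String := ("Hello World", "world")

def Spec_stringMatching (textInput : String) (patternInput : String) (out : Int) : Prop := out = stringMatching_alt textInput patternInput
instance (textInput : String) (patternInput : String) (out : Int) : Decidable (Spec_stringMatching textInput patternInput out) := by unfold Spec_stringMatching; infer_instance

-- ===== CLAIM (what is proved, stated in full; the proofs are below) =====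
def Claim_equal_stringMatching : Prop := ∀ (textInput : String) (patternInput : String), Dom_stringMatching textInput patternInput → Pre_stringMatching textInput patternInput → Spec_stringMatching textInput patternInput (stringMatching textInput patternInput)

-- ===== LEMMAS AND PROOFS =====

-- characters: lowerChar / isspace facts

theorem lowerChar_toNat (c : Char) :
    (PySem.Chars.lowerChar c).toNat = if PySem.Chars.isupper c then c.toNat + 32 else c.toNat := by
  unfold PySem.Chars.lowerChar
  split_ifs with h
  · have hb : 'A' ≤ c ∧ c ≤ 'Z' := by simpa [PySem.Chars.isupper] using h
    have h1 : 65 ≤ c.toNat := hb.1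
    have h2 : c.toNat ≤ 90 := hb.2
    rw [Char.toNat_ofNat, if_pos (Or.inl (by omega))]
  · rfl

theorem isupper_iff (c : Char) : PySem.Chars.isupper c = true ↔ 65 ≤ c.toNat ∧ c.toNat ≤ 90 := by
  simp [PySem.Chars.isupper]
  exact ⟨fun ⟨a, b⟩ => ⟨a, b⟩, fun ⟨a, b⟩ => ⟨a, b⟩⟩

theorem isspace_iff (c : Char) : PySem.Chars.isspace c = true ↔
    (c.toNat = 32 ∨ (9 ≤ c.toNat ∧ c.toNat ≤ 13) ∨ (28 ≤ c.toNat ∧ c.toNat ≤ 31) ∨ c.toNat = 133 ∨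
      c.toNat = 160 ∨ c.toNat = 5760 ∨ (8192 ≤ c.toNat ∧ c.toNat ≤ 8202) ∨ c.toNat = 8232 ∨
      c.toNat = 8233 ∨ c.toNat = 8239 ∨ c.toNat = 8287 ∨ c.toNat = 12288) := by
  simp [PySem.Chars.isspace]; tauto

theorem isspace_lowerChar (c : Char) :
    PySem.Chars.isspace (PySem.Chars.lowerChar c) = PySem.Chars.isspace c := by
  have h := lowerChar_toNat c
  by_cases hu : PySem.Chars.isupper c = true
  · rw [if_pos hu] at h
    have hb := (isupper_iff c).1 hu
    have h1 : PySem.Chars.isspace (PySem.Chars.lowerChar c) = false := by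
      rw [Bool.eq_false_iff]; intro hs; have := (isspace_iff _).1 hs; omega
    have h2 : PySem.Chars.isspace c = false := by
      rw [Bool.eq_false_iff]; intro hs; have := (isspace_iff _).1 hs; omega
    rw [h1, h2]
  · unfold PySem.Chars.lowerChar
    rw [if_neg hu]

theorem lowerChar_lowerChar (c : Char) :
    PySem.Chars.lowerChar (PySem.Chars.lowerChar c) = PySem.Chars.lowerChar c := by
  have hnu : ¬ PySem.Chars.isupper (PySem.Chars.lowerChar c) = true := by
    intro hu
    have h1 := (isupper_iff _).1 hu
    rw [lowerChar_toNat c] at h1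
    by_cases h : PySem.Chars.isupper c = true
    · rw [if_pos h] at h1; have := (isupper_iff c).1 h; omega
    · rw [if_neg h] at h1; exact h ((isupper_iff c).2 h1)
  calc PySem.Chars.lowerChar (PySem.Chars.lowerChar c)
      = if PySem.Chars.isupper (PySem.Chars.lowerChar c) = true then
          Char.ofNat ((PySem.Chars.lowerChar c).toNat + 32) else PySem.Chars.lowerChar c := rfl
    _ = PySem.Chars.lowerChar c := if_neg hnu

theorem lowerChar_toNat_lt (c : Char) (h : c.toNat < 128) :
    (PySem.Chars.lowerChar c).toNat < 128 := by
  rw [lowerChar_toNat c]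
  split_ifs with hu
  · have := (isupper_iff c).1 hu; omega
  · exact h

-- strings: lower / strip interaction

theorem lower_lower (s : List Char) :
    PySem.Chars.lower (PySem.Chars.lower s) = PySem.Chars.lower s := by
  unfold PySem.Chars.lower
  rw [List.map_map]
  exact List.map_congr_left (fun c _ => lowerChar_lowerChar c)

theorem lower_lstrip (s : List Char) :
    PySem.Chars.lower (PySem.Chars.lstrip s) = PySem.Chars.lstrip (PySem.Chars.lower s) := by
  unfold PySem.Chars.lower PySem.Chars.lstrip
  rw [List.dropWhile_map,
      show (PySem.Chars.isspace ∘ PySem.Chars.lowerChar) = PySem.Chars.isspace from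
        funext fun c => isspace_lowerChar c]

theorem lower_rstrip (s : List Char) :
    PySem.Chars.lower (PySem.Chars.rstrip s) = PySem.Chars.rstrip (PySem.Chars.lower s) := by
  unfold PySem.Chars.lower PySem.Chars.rstrip
  rw [← List.map_reverse, List.dropWhile_map, ← List.map_reverse,
      show (PySem.Chars.isspace ∘ PySem.Chars.lowerChar) = PySem.Chars.isspace from
        funext fun c => isspace_lowerChar c]

theorem lower_strip (s : List Char) :
    PySem.Chars.lower (PySem.Chars.strip s) = PySem.Chars.strip (PySem.Chars.lower s) := by
  unfold PySem.Chars.strip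
  rw [lower_rstrip, lower_lstrip]

theorem rstrip_prefix (y : List Char) : PySem.Chars.rstrip y <+: y := by
  unfold PySem.Chars.rstrip
  have := List.reverse_prefix.mpr (List.dropWhile_suffix (l := y.reverse) PySem.Chars.isspace)
  rwa [List.reverse_reverse] at this

theorem lstrip_rstrip_lstrip (s : List Char) :
    PySem.Chars.lstrip (PySem.Chars.rstrip (PySem.Chars.lstrip s)) =
      PySem.Chars.rstrip (PySem.Chars.lstrip s) := by
  show List.dropWhile PySem.Chars.isspace (PySem.Chars.rstrip (PySem.Chars.lstrip s)) =
    PySem.Chars.rstrip (PySem.Chars.lstrip s)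
  rw [List.dropWhile_eq_self_iff]
  intro hl
  have hpre := rstrip_prefix (PySem.Chars.lstrip s)
  rw [hpre.getElem hl]
  have hy : PySem.Chars.lstrip s ≠ [] :=
    List.ne_nil_of_length_pos (by have := hpre.length_le; omega)
  have h2 : PySem.Chars.isspace ((PySem.Chars.lstrip s).head hy) = false :=
    List.head_dropWhile_not PySem.Chars.isspace hy
  rw [List.getElem_zero_eq_head]
  simp [h2]

theorem strip_strip (s : List Char) :
    PySem.Chars.strip (PySem.Chars.strip s) = PySem.Chars.strip s := by
  unfold PySem.Chars.strip
  rw [lstrip_rstrip_lstrip]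
  show PySem.Chars.rstrip (PySem.Chars.rstrip (PySem.Chars.lstrip s)) = _
  unfold PySem.Chars.rstrip
  rw [List.reverse_reverse, List.dropWhile_idempotent]

theorem strip_subset (s : List Char) : PySem.Chars.strip s ⊆ s := by
  intro x hx
  have h1 := (rstrip_prefix (PySem.Chars.lstrip s)).subset hx
  unfold PySem.Chars.lstrip at h1
  exact (List.dropWhile_sublist _).subset h1

theorem processed_lt (s : String) (h : pvDomStr s = true) :
    ∀ c ∈ PySem.Chars.strip (PySem.Chars.lower s.toList), c.toNat < 128 := by
  intro c hc
  have h1 : c ∈ PySem.Chars.lower s.toList := strip_subset _ hc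
  unfold PySem.Chars.lower at h1
  obtain ⟨d, hd, rfl⟩ := List.mem_map.1 h1
  have hdom : pvDomChar d = true := by
    unfold pvDomStr at h
    exact List.all_eq_true.1 h d hd
  apply lowerChar_toNat_lt
  unfold pvDomChar at hdom
  simp at hdom
  omega

theorem processed_fixed (s : List Char) :
    PySem.Chars.strip (PySem.Chars.lower (PySem.Chars.strip (PySem.Chars.lower s))) =
      PySem.Chars.strip (PySem.Chars.lower s) := by
  rw [lower_strip, lower_lower, strip_strip]

-- the last-occurrence table

def pvTable (p : List Char) : List Int :=
  (PySem.List.enumerate p 0).foldl (fun last ic => last.set ic.2.toNat ic.1)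
    (List.replicate 128 (-1))

theorem buildLast_eq (s : List Char) :
    buildLast (PySem.Chars.strip (PySem.Chars.lower s)) =
      pvTable (PySem.Chars.strip (PySem.Chars.lower s)) := by
  unfold buildLast pvTable
  rw [processed_fixed]

theorem pvTable_append (q : List Char) (a : Char) :
    pvTable (q ++ [a]) = (pvTable q).set a.toNat (q.length : Int) := by
  unfold pvTable
  rw [PySem.List.enumerate_append, List.foldl_append]
  simp

theorem pvTable_length (p : List Char) : (pvTable p).length = 128 := by
  induction p using List.reverseRecOn with
  | nil => rfl
  | append_singleton q a ih => rw [pvTable_append, List.length_set, ih]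

theorem pvTable_mem_lb (p : List Char) : ∀ e ∈ pvTable p, -1 ≤ e := by
  induction p using List.reverseRecOn with
  | nil =>
    intro e he
    have := List.eq_of_mem_replicate (show e ∈ List.replicate 128 (-1 : Int) from he)
    omega
  | append_singleton q a ih =>
    intro e he
    rw [pvTable_append] at he
    rcases List.mem_or_eq_of_mem_set he with h | h
    · exact ih e h
    · subst h; omega

theorem pvTable_lb (p : List Char) (x : Int) : -1 ≤ PySem.List.pyGetD (pvTable p) x (-1) := by
  unfold PySem.List.pyGetD
  cases hg : PySem.List.pyGet? (pvTable p) x with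
  | none => simp
  | some v =>
    simp only [Option.getD_some]
    exact pvTable_mem_lb p v (PySem.List.mem_of_pyGet?_eq_some _ hg)

theorem pyGetD_set (L : List Int) (v : Int) (i x : Nat) (hx : x < L.length) :
    PySem.List.pyGetD (L.set i v) (x : Int) (-1) =
      if i = x then v else PySem.List.pyGetD L (x : Int) (-1) := by
  by_cases hi : i < L.length
  · rw [PySem.List.pyGetD_eq_getElem _ _ (Int.natCast_nonneg x)
        (by rw [List.length_set]; exact_mod_cast hx),
      PySem.List.pyGetD_eq_getElem _ _ (Int.natCast_nonneg x) (by exact_mod_cast hx)]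
    simp only [Int.toNat_natCast]
    by_cases h : i = x
    · subst h; rw [List.getElem_set_self, if_pos rfl]
    · rw [List.getElem_set_ne h, if_neg h]
  · rw [List.set_eq_of_length_le (by omega), if_neg (by omega)]

theorem pvTable_ub (p : List Char) (c : Char) (h128 : c.toNat < 128) :
    ∀ (k : Nat) (hk : k < p.length), p[k] = c →
      (k : Int) ≤ PySem.List.pyGetD (pvTable p) (c.toNat : Int) (-1) := by
  induction p using List.reverseRecOn with
  | nil => intro k hk _; simp at hk
  | append_singleton q a ih =>
    intro k hk hc
    have hk' : k < q.length + 1 := by simpa using hk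
    have hcl : c.toNat < (pvTable q).length := by rw [pvTable_length]; exact h128
    rw [pvTable_append, pyGetD_set _ _ _ _ hcl]
    by_cases hac : a.toNat = c.toNat
    · rw [if_pos hac]; omega
    · have hkq : k ≠ q.length := by
        intro h
        subst h
        have ha : (q ++ [a])[q.length] = a := by simp
        rw [hc] at ha
        rw [ha] at hac
        exact hac rfl
      have hklt : k < q.length := by omega
      rw [if_neg hac]
      refine ih k hklt ?_
      rw [← hc]
      exact (List.getElem_append_left hklt).symm

-- occurrences and Chars.find

theorem find_eq_of (t p : List Char) (s : Nat) (hocc : p <+: t.drop s)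
    (hmin : ∀ u, u < s → ¬ p <+: t.drop u) : PySem.Chars.find t p = (s : Int) := by
  have hinf : p <:+: t := hocc.isInfix.trans (List.drop_suffix s t).isInfix
  have h0 : 0 ≤ PySem.Chars.find t p := (PySem.Chars.find_nonneg_iff t p).2 hinf
  obtain ⟨h1, h2⟩ := PySem.Chars.find_spec h0
  have ha : ¬ ((PySem.Chars.find t p).toNat < s) := fun hlt => hmin _ hlt h1
  have hb : ¬ (s < (PySem.Chars.find t p).toNat) := fun hlt => h2 s hlt hocc
  omega

theorem find_eq_neg_one_of (t p : List Char) (h : ∀ u : Nat, ¬ p <+: t.drop u) :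
    PySem.Chars.find t p = -1 := by
  rw [PySem.Chars.find_eq_neg_one_iff]
  intro hinf
  obtain ⟨u, hu⟩ := (PySem.Chars.exists_prefix_drop_iff_isIn p t).2
    ((PySem.Chars.isIn_iff_infix p t).2 hinf)
  exact h u hu

theorem occ_length_le (t p : List Char) (u : Nat) (hp : 0 < p.length) (h : p <+: t.drop u) :
    u + p.length ≤ t.length := by
  have := h.length_le
  rw [List.length_drop] at this
  omega

-- ===== the loop invariant =====

theorem bmLoop_correct (t p : List Char)
    (hp : 0 < p.length)
    (hDomT : ∀ c ∈ t, c.toNat < 128) :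
    ∀ (fuel : Nat) (s j : Nat), j < p.length →
      (t.length - s) * p.length + j < fuel →
      (∀ u, u < s → ¬ p <+: t.drop u) →
      (∀ d, j < d → d < p.length → t[s+d]? = p[d]?) →
      bmLoop t p (pvTable p) fuel ((s+j : Nat) : Int) ((j : Nat) : Int) =
        PySem.Chars.find t p := by
  intro fuel
  induction fuel with
  | zero => intro s j hj hfuel hno hmat; omega
  | succ f ih =>
    intro s j hj hfuel hno hmat
    rw [bmLoop]
    by_cases hin : ((s+j : Nat) : Int) < (t.length : Int)
    · rw [if_pos hin]
      have hsj : s + j < t.length := by exact_mod_cast hin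
      have htx : PySem.List.pyGetD t ((s+j : Nat) : Int) ' ' = t[s+j]'hsj := by
        rw [PySem.List.pyGetD_eq_getElem t ' ' (Int.natCast_nonneg _) (by exact_mod_cast hin)]
        simp only [Int.toNat_natCast]
      have hpx : PySem.List.pyGetD p ((j : Nat) : Int) ' ' = p[j]'hj := by
        rw [PySem.List.pyGetD_eq_getElem p ' ' (Int.natCast_nonneg _) (by exact_mod_cast hj)]
        simp only [Int.toNat_natCast]
      rw [htx, hpx]
      by_cases heq : t[s+j]'hsj = p[j]'hj
      · rw [if_pos heq]
        by_cases hj0 : ((j : Nat) : Int) = 0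
        · have hj0' : j = 0 := by exact_mod_cast hj0
          rw [if_pos hj0]
          subst hj0'
          have hocc : p <+: t.drop s := by
            rw [List.prefix_iff_getElem?]
            intro d hd
            rw [List.getElem?_drop]
            rcases Nat.eq_zero_or_pos d with h0 | hpos
            · subst h0
              rw [List.getElem?_eq_getElem hsj]
              exact congrArg some heq
            · have := hmat d hpos hd
              rw [this, List.getElem?_eq_getElem hd]
          rw [find_eq_of t p s hocc hno]
          omega
        · rw [if_neg hj0]
          have hjpos : 0 < j := by omega
          have e1 : ((s+j : Nat) : Int) - 1 = ((s + (j-1) : Nat) : Int) := by omega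
          have e2 : ((j : Nat) : Int) - 1 = ((j-1 : Nat) : Int) := by omega
          rw [e1, e2]
          refine ih s (j-1) (by omega) (by omega) hno ?_
          intro d hd1 hd2
          rcases Nat.lt_or_ge j d with h | h
          · exact hmat d h hd2
          · have hdj : d = j := by omega
            subst hdj
            rw [List.getElem?_eq_getElem hsj, List.getElem?_eq_getElem hd2]
            exact congrArg some heq
      · rw [if_neg heq]
        have hc128 : (t[s+j]'hsj).toNat < 128 := hDomT _ (List.getElem_mem hsj)
        have hlb := pvTable_lb p ((t[s+j]'hsj).toNat : Int)
        have hub := pvTable_ub p (t[s+j]'hsj) hc128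
        set c := t[s+j]'hsj with hcdef
        set lastc := PySem.List.pyGetD (pvTable p) ((c.toNat : Nat) : Int) (-1) with hlastc
        set mn := min ((j : Nat) : Int) (lastc + 1) with hmndef
        have hmn0 : 0 ≤ mn := le_min (Int.natCast_nonneg j) (by omega)
        have hmnj : mn ≤ (j : Int) := min_le_left _ _
        have hms : mn.toNat ≤ j := by omega
        set s' := s + j + 1 - mn.toNat with hs'def
        have hs'1 : s + 1 ≤ s' := by omega
        have e3 : ((s+j : Nat) : Int) + (p.length : Int) - mn = ((s' + (p.length-1) : Nat) : Int) := by
          omega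
        have e4 : (p.length : Int) - 1 = ((p.length - 1 : Nat) : Int) := by omega
        rw [e3, e4]
        have hfuel' : (t.length - s') * p.length + (p.length - 1) < f := by
          have hsn : s < t.length := by omega
          have hmul1 : p.length ≤ (t.length - s) * p.length :=
            Nat.le_mul_of_pos_left _ (by omega)
          rcases Nat.lt_or_ge s' t.length with hlt | hge
          · have hstep : (t.length - s') * p.length ≤ (t.length - (s+1)) * p.length :=
              Nat.mul_le_mul_right _ (by omega)
            have hexp : (t.length - (s+1)) * p.length + p.length = (t.length - s) * p.length := by
              rw [← Nat.succ_mul]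
              congr 1
              omega
            omega
          · have : t.length - s' = 0 := by omega
            rw [this, Nat.zero_mul]
            omega
        refine ih s' (p.length - 1) (by omega) hfuel' ?_ (by intro d h1 h2; omega)
        intro u hu hocc
        rcases Nat.lt_or_ge u s with hus | hsu
        · exact hno u hus hocc
        · have hocc' := (List.prefix_iff_getElem?.1 hocc)
          rcases Nat.eq_or_lt_of_le hsu with hueq | hult
          · -- u = s : the mismatch position itself refutes the occurrence
            subst hueq
            have := hocc' j hj
            rw [List.getElem?_drop, List.getElem?_eq_getElem hsj] at this
            exact heq (Option.some.inj this)
          · -- s < u < s' : the bad-character table refutes the occurrence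
            have hd_lt : s + j - u < j := by omega
            have hd_ge : mn.toNat ≤ s + j - u := by omega
            have hget := hocc' (s + j - u) (by omega)
            rw [List.getElem?_drop] at hget
            have hidx : u + (s + j - u) = s + j := by omega
            rw [hidx, List.getElem?_eq_getElem hsj] at hget
            have hpc : p[s + j - u]'(by omega) = c := (Option.some.inj hget).symm
            have hkb := hub (s + j - u) (by omega) hpc
            -- mn = min j (lastc+1); since (s+j-u) < j we must have mn = lastc+1
            rcases le_total ((j : Nat) : Int) (lastc + 1) with hcase | hcase
            · rw [hmndef] at hd_ge hms
              rw [min_eq_left hcase] at hd_ge hms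
              omega
            · rw [hmndef] at hd_ge hms
              rw [min_eq_right hcase] at hd_ge hms
              omega
    · rw [if_neg hin]
      symm
      apply find_eq_neg_one_of
      intro u hocc
      have hle := occ_length_le t p u hp hocc
      rcases Nat.lt_or_ge u s with hus | hsu
      · exact hno u hus hocc
      · have : ¬ (s + j < t.length) := fun h => hin (by exact_mod_cast h)
        omega

-- ===== VERDICT (by name: the statement is the Claim_ definition above) =====
theorem stringMatching_spec : Claim_equal_stringMatching := by
  unfold Claim_equal_stringMatching
  intro textInput patternInput hDom hPre
  unfold Spec_stringMatching stringMatching stringMatching_alt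
  unfold Pre_stringMatching at hPre
  show bmLoop (PySem.Chars.strip (PySem.Chars.lower textInput.toList))
      (PySem.Chars.strip (PySem.Chars.lower patternInput.toList))
      (buildLast (PySem.Chars.strip (PySem.Chars.lower patternInput.toList))) _ _ _ = _
  rw [if_neg hPre, buildLast_eq]
  have hDom' : pvDomStr textInput = true := by
    unfold Dom_stringMatching at hDom
    have := hDom
    rw [Bool.and_eq_true] at this
    exact this.1
  have hDomT := processed_lt textInput hDom'
  have hm : 0 < (PySem.Chars.strip (PySem.Chars.lower patternInput.toList)).length :=
    List.length_pos_of_ne_nil hPre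
  set t := PySem.Chars.strip (PySem.Chars.lower textInput.toList) with ht
  set p := PySem.Chars.strip (PySem.Chars.lower patternInput.toList) with hpdef
  have e1 : (p.length : Int) - 1 = ((0 + (p.length - 1) : Nat) : Int) := by omega
  have e2 : (p.length : Int) - 1 = ((p.length - 1 : Nat) : Int) := by omega
  calc bmLoop t p (pvTable p) (t.length * p.length + p.length + 1)
        ((p.length : Int) - 1) ((p.length : Int) - 1)
      = bmLoop t p (pvTable p) (t.length * p.length + p.length + 1)
        ((0 + (p.length - 1) : Nat) : Int) ((p.length - 1 : Nat) : Int) := by rw [← e1, ← e2]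
    _ = PySem.Chars.find t p := by
        refine bmLoop_correct t p hm hDomT _ 0 (p.length - 1) (by omega) ?_
          (by intro u hu; omega) (by intro d h1 h2; omega)
        have : t.length - 0 = t.length := Nat.sub_zero _
        rw [this]
        omega
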